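-- pv_equiv track=rewrite | github.com/yuitokyouni/JWFE | japan-financial-world/tests/test_stress_programs.py | _strip_module_docstring
-- ===== SOURCE A (Python) =====
-- def _strip_module_docstring(text: str) -> str:
--     """Strip every triple-quoted docstring in the module text.
--     The v1.21.1 module legitimately mentions the v1.21.0a
--     forbidden tokens inside class / method docstrings to
--     document the boundary; those mentions are textual, not
--     code, and must be excluded from the scan."""
--     out: list[str] = []
--     i = 0
--     while True:
--         lo = text.find('"""', i)
--         if lo < 0:
--             out.append(text[i:])
--             break
--         out.append(text[i:lo])
--         hi = text.find('"""', lo + 3)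
--         if hi < 0:
--             # Unterminated docstring: leave the rest untouched
--             # (defensive — should never happen in valid Python).
--             out.append(text[lo:])
--             break
--         i = hi + 3
--     return "".join(out)
-- ===== SOURCE B (Python) =====
-- def _strip_module_docstring(text: str) -> str:
--     parts = text.split('"""')
--     kept = parts[0::2]
--     if len(parts) % 2 == 0:
--         # odd number of delimiters: the last docstring is unterminated;
--         # keep its opening quotes and the rest untouched, as intended.
--         kept.append('"""' + parts[-1])
--     return "".join(kept)
-- ===== Notes on version B (the rewrite author's own statement) =====
-- stated objective: simpler
-- what changed: Replaces A's index-tracking while/find loop with a single split on '"""' followed by keeping the even-indexed parts (parts[0::2]) and joining them, with the last part re-prefixed by '"""' when the delimiter count is odd (unterminated docstring left untouched, as A intends).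
import Mathlib
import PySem

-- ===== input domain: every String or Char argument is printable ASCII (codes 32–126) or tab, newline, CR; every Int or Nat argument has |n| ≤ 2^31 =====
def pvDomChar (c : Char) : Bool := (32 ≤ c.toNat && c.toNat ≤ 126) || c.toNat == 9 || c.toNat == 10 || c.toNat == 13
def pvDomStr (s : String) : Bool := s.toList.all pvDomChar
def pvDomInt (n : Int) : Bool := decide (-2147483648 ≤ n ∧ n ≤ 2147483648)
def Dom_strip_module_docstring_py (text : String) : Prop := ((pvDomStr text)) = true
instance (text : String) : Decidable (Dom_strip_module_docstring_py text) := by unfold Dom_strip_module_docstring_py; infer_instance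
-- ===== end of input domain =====

-- B replaces A's index-tracking find loop by one split on '"""' plus keeping the
-- even-indexed parts (objective: simpler decomposition, same behaviour).

-- ===== PORT A =====
-- the delimiter '"""' as a char list (both ports scan for it)
def pvQuotes : List Char := ['"', '"', '"']

-- A's while-loop: each round finds the opening and closing '"""' from position i;
-- we work on the remaining suffix of the text (indices relative to it), which is
-- the same values A computes: text[i:lo] = take lo, text[lo:] = drop lo, etc.
def pvStripA (cs : List Char) : List Char :=
  if _hlo : PySem.Chars.find cs pvQuotes < 0 then
    cs                                   -- out.append(text[i:]); break
  else
    let lo := (PySem.Chars.find cs pvQuotes).toNat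
    let rest := cs.drop (lo + 3)
    if PySem.Chars.find rest pvQuotes < 0 then
      -- unterminated: out.append(text[i:lo]); out.append(text[lo:]); break
      cs.take lo ++ cs.drop lo
    else
      cs.take lo ++ pvStripA (rest.drop ((PySem.Chars.find rest pvQuotes).toNat + 3))
termination_by cs.length
decreasing_by
  have h1 : pvQuotes <:+: cs := by
    rw [← PySem.Chars.find_nonneg_iff]; omega
  have h2 := h1.length_le
  simp only [pvQuotes, List.length_cons, List.length_nil] at h2
  simp only [List.length_drop]
  omega

def strip_module_docstring_py (text : String) : String :=
  String.ofList (pvStripA text.toList)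

-- ===== PORT B =====
-- Source B's body on the char list: parts = text.split('"""'); kept = parts[0::2];
-- if len(parts) % 2 == 0: kept.append('"""' + parts[-1]); return "".join(kept)
def pvAltList (cs : List Char) : List Char :=
  let parts := PySem.Chars.splitOn cs pvQuotes
  let kept := (PySem.List.slice? parts none none 2).getD []   -- parts[0::2] (step 2 ≠ 0, never none)
  let kept2 := if parts.length % 2 == 0 then kept ++ [pvQuotes ++ parts.getLastD []] else kept
  PySem.Chars.join [] kept2

def strip_module_docstring_py_alt (text : String) : String :=
  String.ofList (pvAltList text.toList)

-- ===== PRECONDITION & SPEC =====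
def Spec_strip_module_docstring_py (text : String) (out : String) : Prop := out = strip_module_docstring_py_alt text
instance (text : String) (out : String) : Decidable (Spec_strip_module_docstring_py text out) := by unfold Spec_strip_module_docstring_py; infer_instance

-- ===== CLAIM (what is proved, stated in full; the proofs are below) =====
def Claim_equal_strip_module_docstring_py : Prop := ∀ (text : String), Dom_strip_module_docstring_py text → Spec_strip_module_docstring_py text (strip_module_docstring_py text)

-- ===== LEMMAS AND PROOFS =====

-- structural mirror of PySem.Chars.splitOn's scanner (for sep = pvQuotes)
def pvScan (l : List Char) : List (List Char) :=
  match l with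
  | [] => [[]]
  | c :: rest =>
    if pvQuotes.isPrefixOf (c :: rest) then [] :: pvScan (rest.drop 2)
    else (pvScan rest).modifyHead (c :: ·)
termination_by l.length
decreasing_by all_goals (simp [List.length_drop]; try omega)

-- every-other-element selection, the value of parts[0::2]
def pvEvens {α : Type} : List α → List α
  | [] => []
  | [x] => [x]
  | x :: _ :: r => x :: pvEvens r

lemma pvScan_ne_nil (l : List Char) : pvScan l ≠ [] := by
  induction l using pvScan.induct with
  | case1 => simp [pvScan]
  | case2 c rest h ih => rw [pvScan]; simp [h]
  | case3 c rest h ih => rw [pvScan]; simp [h]; cases hh : pvScan rest <;> simp_all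

lemma pvGo_eq (fuel : Nat) : ∀ (l cur : List Char) (acc : List (List Char)),
    l.length ≤ fuel →
    PySem.Chars.splitOn.go pvQuotes fuel l cur acc
      = acc.reverse ++ (pvScan l).modifyHead (cur.reverse ++ ·) := by
  induction fuel with
  | zero =>
    intro l cur acc h
    have : l = [] := by cases l <;> simp_all
    subst this
    simp [PySem.Chars.splitOn.go, pvScan]
  | succ fuel ih =>
    intro l cur acc h
    cases l with
    | nil => simp [PySem.Chars.splitOn.go, pvScan]
    | cons c rest =>
      rw [PySem.Chars.splitOn.go]
      by_cases hp : pvQuotes.isPrefixOf (c :: rest)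
      · rw [if_pos hp]
        rw [ih _ _ _ (by simp [pvQuotes] at h ⊢; omega)]
        rw [pvScan, if_pos hp]
        simp only [pvQuotes, List.length_cons, List.length_nil, List.drop_succ_cons]
        cases pvScan (List.drop 2 rest) <;> simp
      · rw [if_neg hp]
        rw [ih _ _ _ (by simp at h ⊢; omega)]
        rw [pvScan, if_neg hp]
        cases hh : pvScan rest <;> simp [List.modifyHead]

lemma pvSplitOn_eq_scan (l : List Char) :
    PySem.Chars.splitOn l pvQuotes = pvScan l := by
  rw [PySem.Chars.splitOn, pvGo_eq _ _ _ _ (by omega)]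
  cases hh : pvScan l <;> simp [List.modifyHead]

lemma pvFind_eq_of {l q : List Char} {n : Nat}
    (h1 : q <+: l.drop n) (h2 : ∀ i, i < n → ¬ q <+: l.drop i) :
    PySem.Chars.find l q = n := by
  have hinf : q <:+: l := by
    obtain ⟨t, ht⟩ := h1
    exact ⟨l.take n, t, by rw [List.append_assoc, ht, List.take_append_drop]⟩
  have hnn : 0 ≤ PySem.Chars.find l q := (PySem.Chars.find_nonneg_iff l q).mpr hinf
  obtain ⟨hpre, hmin⟩ := PySem.Chars.find_spec hnn
  set m := (PySem.Chars.find l q).toNat with hm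
  have : m = n := by
    rcases Nat.lt_trichotomy m n with h | h | h
    · exact absurd hpre (h2 m h)
    · exact h
    · exact absurd h1 (hmin n h)
  omega

lemma pvScan_of_neg {l : List Char} (h : PySem.Chars.find l pvQuotes < 0) :
    pvScan l = [l] := by
  have hni : ¬ pvQuotes <:+: l := by
    rw [← PySem.Chars.find_nonneg_iff]; omega
  clear h
  induction l with
  | nil => simp [pvScan]
  | cons c rest ih =>
    have hp : ¬ pvQuotes.isPrefixOf (c :: rest) := by
      intro hp
      exact hni (List.IsPrefix.isInfix (List.isPrefixOf_iff_prefix.mp hp))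
    rw [pvScan, if_neg hp]
    rw [ih (fun hinf => hni (hinf.trans (List.suffix_cons c rest).isInfix))]
    simp

lemma pvScan_of_nonneg {l : List Char} (h : 0 ≤ PySem.Chars.find l pvQuotes) :
    pvScan l = l.take (PySem.Chars.find l pvQuotes).toNat
      :: pvScan (l.drop ((PySem.Chars.find l pvQuotes).toNat + 3)) := by
  induction l with
  | nil =>
    exfalso
    have := (PySem.Chars.find_nonneg_iff [] pvQuotes).mp h
    simp [pvQuotes] at this
  | cons c rest ih =>
    obtain ⟨n, hfind⟩ : ∃ n : Nat, PySem.Chars.find (c :: rest) pvQuotes = (n : Int) :=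
      ⟨_, (Int.toNat_of_nonneg h).symm⟩
    obtain ⟨hpre, hmin⟩ := PySem.Chars.find_spec h
    rw [hfind] at hpre hmin ⊢
    simp only [Int.toNat_natCast] at hpre hmin ⊢
    by_cases hp : pvQuotes <+: (c :: rest)
    · have h0 : n = 0 := by
        by_contra h0
        exact hmin 0 (by omega) (by simpa using hp)
      subst h0
      rw [pvScan, if_pos (List.isPrefixOf_iff_prefix.mpr hp)]
      simp
    · have hnpos : 0 < n := by
        rcases Nat.eq_zero_or_pos n with h0 | h0
        · exact absurd (by simpa [h0] using hpre) hp
        · exact h0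
      have hfr : PySem.Chars.find rest pvQuotes = ((n - 1 : Nat) : Int) := by
        apply pvFind_eq_of
        · have e : rest.drop (n - 1) = (c :: rest).drop n := by
            cases n with
            | zero => omega
            | succ k => simp
          rw [e]; exact hpre
        · intro i hi hcon
          exact hmin (i + 1) (by omega) (by simpa using hcon)
      have hp' : ¬ pvQuotes.isPrefixOf (c :: rest) := fun hh => hp (List.isPrefixOf_iff_prefix.mp hh)
      rw [pvScan, if_neg hp']
      rw [ih (by rw [hfr]; exact_mod_cast Int.natCast_nonneg _), hfr]
      simp only [Int.toNat_natCast]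
      have e2 : c :: rest.take (n - 1) = (c :: rest).take n := by
        cases n with
        | zero => omega
        | succ k => simp
      have e3 : rest.drop (n - 1 + 3) = (c :: rest).drop (n + 3) := by
        cases n with
        | zero => omega
        | succ k =>
          have e : k + 1 + 3 = (k + 3) + 1 := by omega
          rw [e, List.drop_succ_cons, Nat.succ_sub_one]
      rw [List.modifyHead, e2, e3]

lemma pvEvensAux {α : Type} (l : List α) :
    (List.range ((l.length + 1) / 2)).filterMap (fun k => l[2 * k]?) = pvEvens l := by
  induction l using pvEvens.induct with
  | case1 => simp [pvEvens]
  | case2 x => simp [pvEvens]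
  | case3 x y r ih =>
    have e : (r.length + 2 + 1) / 2 = (r.length + 1) / 2 + 1 := by omega
    simp only [List.length_cons, e, List.range_succ_eq_map]
    rw [List.filterMap_cons, List.filterMap_map]
    have hf : (fun k => (x :: y :: r)[2 * (k + 1)]?) = (fun k => r[2 * k]?) := by
      funext k
      have e2 : 2 * (k + 1) = 2 * k + 1 + 1 := by omega
      rw [e2, List.getElem?_cons_succ, List.getElem?_cons_succ]
    simp only [Nat.mul_zero, List.getElem?_cons_zero, Function.comp_def, Nat.succ_eq_add_one, hf, ih]
    rfl

lemma pvSlice2 {α : Type} (l : List α) :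
    PySem.List.slice? l none none 2 = some (pvEvens l) := by
  rw [PySem.List.slice?]
  simp only [PySem.List.sliceIndices]
  norm_num
  cases l with
  | nil => simp [pvEvens]
  | cons a t =>
    rw [if_pos (by simp)]
    have e1 : (((a :: t).length : Int) + 2 - 1) / 2 = (((a :: t).length + 1) / 2 : Nat) := by
      omega
    rw [e1, Int.toNat_natCast]
    have hf : (fun x : Nat => (a :: t)[(2 * (x : Int)).toNat]?) = (fun x : Nat => (a :: t)[2 * x]?) := by
      funext x
      have e : (2 * (x : Int)).toNat = 2 * x := by omega
      rw [e]
    rw [hf, pvEvensAux]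

lemma pvJoin_nil_cons (x : List Char) (ks : List (List Char)) :
    PySem.Chars.join [] (x :: ks) = x ++ PySem.Chars.join [] ks := by
  cases ks with
  | nil => simp [PySem.Chars.join, List.intercalate]
  | cons y l => simp [PySem.Chars.join, List.intercalate]

lemma pvGetLastD_of_ne_nil {α : Type} {P : List α} (h : P ≠ []) (d1 d2 : α) :
    P.getLastD d1 = P.getLastD d2 := by
  obtain ⟨x, hx⟩ := Option.isSome_iff_exists.mp (List.getLast?_isSome.mpr h)
  simp [List.getLastD_eq_getLast?, hx]

lemma pvStripA_pos {cs : List Char} (h : 0 ≤ PySem.Chars.find cs pvQuotes) :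
    pvStripA cs =
      if PySem.Chars.find (cs.drop ((PySem.Chars.find cs pvQuotes).toNat + 3)) pvQuotes < 0 then
        cs.take (PySem.Chars.find cs pvQuotes).toNat ++ cs.drop (PySem.Chars.find cs pvQuotes).toNat
      else
        cs.take (PySem.Chars.find cs pvQuotes).toNat ++
          pvStripA ((cs.drop ((PySem.Chars.find cs pvQuotes).toNat + 3)).drop
            ((PySem.Chars.find (cs.drop ((PySem.Chars.find cs pvQuotes).toNat + 3)) pvQuotes).toNat + 3)) := by
  rw [pvStripA, dif_neg (by omega)]

lemma pvAlt_cons (a d : List Char) (P : List (List Char)) (hP : P ≠ []) :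
    PySem.Chars.join [] (if ((a :: d :: P).length % 2 == 0) = true
        then (PySem.List.slice? (a :: d :: P) none none 2).getD [] ++ [pvQuotes ++ (a :: d :: P).getLastD []]
        else (PySem.List.slice? (a :: d :: P) none none 2).getD [])
      = a ++ PySem.Chars.join [] (if (P.length % 2 == 0) = true
        then (PySem.List.slice? P none none 2).getD [] ++ [pvQuotes ++ P.getLastD []]
        else (PySem.List.slice? P none none 2).getD []) := by
  rw [pvSlice2, pvSlice2]
  simp only [Option.getD_some]
  have hevens : pvEvens (a :: d :: P) = a :: pvEvens P := rfl
  have hcond : ((a :: d :: P).length % 2 == 0) = (P.length % 2 == 0) := by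
    simp only [List.length_cons]
    have e : P.length + 1 + 1 = P.length + 2 := rfl
    rw [e, Nat.add_mod_right]
  have hlast : (a :: d :: P).getLastD [] = P.getLastD [] := by
    rw [List.getLastD_cons, List.getLastD_cons]
    exact pvGetLastD_of_ne_nil hP d []
  simp only [hevens, hcond, hlast]
  by_cases hc : ((P.length % 2 == 0) = true)
  · rw [if_pos hc, if_pos hc, List.cons_append, pvJoin_nil_cons]
  · rw [if_neg hc, if_neg hc, pvJoin_nil_cons]

lemma pvMain (cs : List Char) : pvStripA cs = pvAltList cs := by
  induction cs using pvStripA.induct with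
  | case1 cs hlo =>
    rw [pvStripA, dif_pos hlo]
    simp only [pvAltList, pvSplitOn_eq_scan, pvScan_of_neg hlo, pvSlice2]
    simp [pvEvens, PySem.Chars.join, List.intercalate]
  | case2 cs hlo lo rest hhi =>
    have h0 : 0 ≤ PySem.Chars.find cs pvQuotes := by omega
    have hhi' : PySem.Chars.find (cs.drop ((PySem.Chars.find cs pvQuotes).toNat + 3)) pvQuotes < 0 := hhi
    rw [pvStripA_pos h0, if_pos hhi']
    obtain ⟨hpre, -⟩ := PySem.Chars.find_spec h0
    obtain ⟨t, ht⟩ := hpre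
    have hdrop : cs.drop ((PySem.Chars.find cs pvQuotes).toNat + 3) = t := by
      have h1 : List.drop 3 (List.drop (PySem.Chars.find cs pvQuotes).toNat cs) = t := by
        rw [← ht]; simp [pvQuotes]
      rw [← h1, List.drop_drop]
    simp only [pvAltList, pvSplitOn_eq_scan]
    rw [pvScan_of_nonneg h0, pvScan_of_neg hhi', pvSlice2]
    simp only [Option.getD_some, pvEvens, List.length_cons, List.length_nil]
    norm_num
    rw [hdrop, pvJoin_nil_cons]
    have hj : PySem.Chars.join [] [pvQuotes ++ t] = pvQuotes ++ t := by
      simp [PySem.Chars.join, List.intercalate]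
    rw [hj, ht, List.take_append_drop]
  | case3 cs hlo lo rest hhi ih =>
    have h0 : 0 ≤ PySem.Chars.find cs pvQuotes := by omega
    have hhi' : ¬ PySem.Chars.find (cs.drop ((PySem.Chars.find cs pvQuotes).toNat + 3)) pvQuotes < 0 := hhi
    rw [pvStripA_pos h0, if_neg hhi']
    have ih' : pvStripA ((cs.drop ((PySem.Chars.find cs pvQuotes).toNat + 3)).drop
        ((PySem.Chars.find (cs.drop ((PySem.Chars.find cs pvQuotes).toNat + 3)) pvQuotes).toNat + 3))
        = pvAltList ((cs.drop ((PySem.Chars.find cs pvQuotes).toNat + 3)).drop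
        ((PySem.Chars.find (cs.drop ((PySem.Chars.find cs pvQuotes).toNat + 3)) pvQuotes).toNat + 3)) := ih
    rw [ih']
    simp only [pvAltList, pvSplitOn_eq_scan]
    rw [pvScan_of_nonneg h0,
      pvScan_of_nonneg (by omega : 0 ≤ PySem.Chars.find (cs.drop ((PySem.Chars.find cs pvQuotes).toNat + 3)) pvQuotes)]
    rw [pvAlt_cons _ _ _ (pvScan_ne_nil _)]

-- ===== VERDICT (by name: the statement is the Claim_ definition above) =====
theorem strip_module_docstring_py_spec : Claim_equal_strip_module_docstring_py := by
  intro text _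
  unfold Spec_strip_module_docstring_py strip_module_docstring_py strip_module_docstring_py_alt
  rw [pvMain]
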